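-- pv_equiv track=rewrite | github.com/smsxgz/euler_project | problems/problems@101~700/problem_166/Criss_Cross.py | Criss_Cross
-- ===== SOURCE A (Python) =====
-- def is_true(mlist):
--     for m in mlist:
--         if m > 9 or m < 0:
--             return False
--     return True
--
-- def Criss_Cross(S):
--     num = 0
--     for n in range(100000):
--         l = []
--         for i in range(5):
--             l = [n % 10] + l
--             n = n // 10
--
--         S1 = sum(l[:3])
--         if (S1 > S) or (S1 < S - 9):
--             continue
--
--         S2 = sum(l[2:])
--         if (S2 > S) or (S2 < S - 9):
--             continue
--
--         SS = S1 + S2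
--         S3 = SS - S
--         S4 = 2 * S - SS
--
--         S5 = l[2] + S4
--         if (S5 > S) or (S5 < S - 9):
--             continue
--
--         for a in range(10):
--             for b in range(10):
--                 c = S3 - b
--                 d = S4 - a
--                 e = S - (l[1] + a + b)
--                 f = S - (l[0] + c + d)
--                 g = S - (l[3] + a + c)
--                 h = S - (l[4] + b + d)
--                 if is_true([c, d, e, f, g, h]):
--                     num += 1
--     return num
-- ===== SOURCE B (Python) =====
-- def Criss_Cross(S):
--     num = 0
--     for n in range(100000):
--         l0 = n // 10000
--         l1 = n // 1000 % 10
--         l2 = n // 100 % 10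
--         l3 = n // 10 % 10
--         l4 = n % 10
--
--         S1 = l0 + l1 + l2
--         if (S1 > S) or (S1 < S - 9):
--             continue
--
--         S2 = l2 + l3 + l4
--         if (S2 > S) or (S2 < S - 9):
--             continue
--
--         SS = S1 + S2
--         S3 = SS - S
--         S4 = 2 * S - SS
--
--         S5 = l2 + S4
--         if (S5 > S) or (S5 < S - 9):
--             continue
--
--         # For each anti-diagonal cell a, the remaining free cell b is pinned to an
--         # integer interval by the six derived cells; count it in closed form.
--         for a in range(10):
--             d = S4 - a
--             if d < 0 or d > 9:
--                 continue
--             lo = max(0, S3 - 9, S - l1 - a - 9, l0 + S3 + S4 - S - a, a - (S - l3 - S3), a + (S - l4 - S4) - 9)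
--             hi = min(9, S3, S - l1 - a, l0 + S3 + S4 - S - a + 9, a - (S - l3 - S3) + 9, a + (S - l4 - S4))
--             num += max(0, hi - lo + 1)
--     return num
-- ===== Notes on version B (the rewrite author's own statement) =====
-- stated objective: faster
-- what changed: The inner 10x10 brute-force scan over the two free cells (a,b) is replaced by a per-a closed-form interval count (intersection of the six linear bounds pinning b), and the five digits are read by direct div/mod arithmetic instead of a digit-extraction loop.
import Mathlib
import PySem

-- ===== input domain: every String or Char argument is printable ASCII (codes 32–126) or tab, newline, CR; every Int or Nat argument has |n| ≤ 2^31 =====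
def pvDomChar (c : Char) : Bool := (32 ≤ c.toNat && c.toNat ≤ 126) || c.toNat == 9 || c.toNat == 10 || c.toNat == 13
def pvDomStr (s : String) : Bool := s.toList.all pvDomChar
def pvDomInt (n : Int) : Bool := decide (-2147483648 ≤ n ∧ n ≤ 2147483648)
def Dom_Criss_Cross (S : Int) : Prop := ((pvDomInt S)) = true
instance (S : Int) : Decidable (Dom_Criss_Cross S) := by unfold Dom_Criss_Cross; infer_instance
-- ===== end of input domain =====

-- B replaces A's inner 10×10 (a,b) scan by a per-a closed-form interval count (and reads the
-- five digits by direct arithmetic instead of a div/mod loop): same results, fewer operations.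

-- ===== PORT A =====
def is_true : List Int → Bool
  | [] => true
  | m :: rest => if m > 9 ∨ m < 0 then false else is_true rest

def Criss_Cross (S : Int) : Int :=
  (PySem.List.pyRange 0 100000 1).foldl (fun num n0 =>
    let st := (PySem.List.pyRange 0 5 1).foldl
      (fun (st : List Int × Int) _ => (PySem.Int.mod st.2 10 :: st.1, PySem.Int.floordiv st.2 10))
      ([], n0)
    let l := st.1
    let S1 := (PySem.List.slice l none (some 3)).sum
    if S1 > S ∨ S1 < S - 9 then num
    else
      let S2 := (PySem.List.slice l (some 2) none).sum
      if S2 > S ∨ S2 < S - 9 then num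
      else
        let SS := S1 + S2
        let S3 := SS - S
        let S4 := 2 * S - SS
        let S5 := PySem.List.pyGetD l 2 0 + S4   -- index 2 is in range (len l = 5)
        if S5 > S ∨ S5 < S - 9 then num
        else
          (PySem.List.pyRange 0 10 1).foldl (fun num a =>
            (PySem.List.pyRange 0 10 1).foldl (fun num b =>
              let c := S3 - b
              let d := S4 - a
              let e := S - (PySem.List.pyGetD l 1 0 + a + b)
              let f := S - (PySem.List.pyGetD l 0 0 + c + d)
              let g := S - (PySem.List.pyGetD l 3 0 + a + c)
              let h := S - (PySem.List.pyGetD l 4 0 + b + d)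
              if is_true [c, d, e, f, g, h] then num + 1 else num) num) num)
    0

-- ===== PORT B =====
def Criss_Cross_alt (S : Int) : Int :=
  (PySem.List.pyRange 0 100000 1).foldl (fun num n =>
    let l0 := PySem.Int.floordiv n 10000
    let l1 := PySem.Int.mod (PySem.Int.floordiv n 1000) 10
    let l2 := PySem.Int.mod (PySem.Int.floordiv n 100) 10
    let l3 := PySem.Int.mod (PySem.Int.floordiv n 10) 10
    let l4 := PySem.Int.mod n 10
    let S1 := l0 + l1 + l2
    if S1 > S ∨ S1 < S - 9 then num
    else
      let S2 := l2 + l3 + l4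
      if S2 > S ∨ S2 < S - 9 then num
      else
        let SS := S1 + S2
        let S3 := SS - S
        let S4 := 2 * S - SS
        let S5 := l2 + S4
        if S5 > S ∨ S5 < S - 9 then num
        else
          (PySem.List.pyRange 0 10 1).foldl (fun num a =>
            let d := S4 - a
            if d < 0 ∨ d > 9 then num
            else
              let lo := max (max (max (max (max 0 (S3 - 9)) (S - l1 - a - 9))
                         (l0 + S3 + S4 - S - a)) (a - (S - l3 - S3))) (a + (S - l4 - S4) - 9)
              let hi := min (min (min (min (min 9 S3) (S - l1 - a))
                         (l0 + S3 + S4 - S - a + 9)) (a - (S - l3 - S3) + 9)) (a + (S - l4 - S4))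
              num + max 0 (hi - lo + 1)) num)
    0

-- ===== PRECONDITION & SPEC =====
def Spec_Criss_Cross (S : Int) (out : Int) : Prop := out = Criss_Cross_alt S
instance (S : Int) (out : Int) : Decidable (Spec_Criss_Cross S out) := by unfold Spec_Criss_Cross; infer_instance

-- ===== CLAIM (what is proved, stated in full; the proofs are below) =====
def Claim_equal_Criss_Cross : Prop := ∀ (S : Int), Dom_Criss_Cross S → Spec_Criss_Cross S (Criss_Cross S)

-- ===== LEMMAS AND PROOFS =====

-- is_true on the six derived cells is exactly six interval conditions
lemma is_true_six (c d e f g h : Int) :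
    is_true [c, d, e, f, g, h] = true ↔
      (0 ≤ c ∧ c ≤ 9) ∧ (0 ≤ d ∧ d ≤ 9) ∧ (0 ≤ e ∧ e ≤ 9) ∧
      (0 ≤ f ∧ f ≤ 9) ∧ (0 ≤ g ∧ g ≤ 9) ∧ (0 ≤ h ∧ h ≤ 9) := by
  simp only [is_true]
  split_ifs <;> simp_all <;> omega

-- counting b ∈ range(m) with lo ≤ b ≤ hi, as a fold, in closed form
lemma count_pyRange (lo hi : Int) (m : Nat) : ∀ (num : Int),
    (PySem.List.pyRange 0 (m : Int) 1).foldl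
      (fun num b => if lo ≤ b ∧ b ≤ hi then num + 1 else num) num
    = num + max 0 (min hi ((m : Int) - 1) - max lo 0 + 1) := by
  induction m with
  | zero => intro num; simp
  | succ m ih =>
    intro num
    rw [show ((m + 1 : Nat) : Int) = (m : Int) + 1 by push_cast; ring,
        PySem.List.pyRange_one_succ_right (by positivity), List.foldl_append, ih]
    simp only [List.foldl]
    split_ifs <;> omega

lemma count_pyRange10 (lo hi num : Int) :
    (PySem.List.pyRange 0 10 1).foldl
      (fun num b => if lo ≤ b ∧ b ≤ hi then num + 1 else num) num
    = num + max 0 (min hi 9 - max lo 0 + 1) := by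
  have h := count_pyRange lo hi 10 num
  norm_num at h
  rw [h]

-- the inner 10×10 scan of A equals B's per-a interval count (S3, S4 arbitrary)
set_option maxHeartbeats 1000000 in
lemma inner_eq (S l0 l1 l3 l4 S3 S4 num : Int) :
    (PySem.List.pyRange 0 10 1).foldl (fun num a =>
      (PySem.List.pyRange 0 10 1).foldl (fun num b =>
        if is_true [S3 - b, S4 - a, S - (l1 + a + b), S - (l0 + (S3 - b) + (S4 - a)),
                    S - (l3 + a + (S3 - b)), S - (l4 + b + (S4 - a))] then num + 1 else num)
        num) num
    = (PySem.List.pyRange 0 10 1).foldl (fun num a =>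
        if S4 - a < 0 ∨ S4 - a > 9 then num
        else
          num + max 0 ((min (min (min (min (min 9 S3) (S - l1 - a))
                     (l0 + S3 + S4 - S - a + 9)) (a - (S - l3 - S3) + 9)) (a + (S - l4 - S4)))
                     - (max (max (max (max (max 0 (S3 - 9)) (S - l1 - a - 9))
                     (l0 + S3 + S4 - S - a)) (a - (S - l3 - S3))) (a + (S - l4 - S4) - 9)) + 1))
        num := by
  apply PySem.List.foldl_congr_mem
  intro num a _
  set lo := max (max (max (max (max 0 (S3 - 9)) (S - l1 - a - 9))
                     (l0 + S3 + S4 - S - a)) (a - (S - l3 - S3))) (a + (S - l4 - S4) - 9) with hlo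
  set hi := min (min (min (min (min 9 S3) (S - l1 - a))
                     (l0 + S3 + S4 - S - a + 9)) (a - (S - l3 - S3) + 9)) (a + (S - l4 - S4)) with hhi
  have hlo0 : (0:Int) ≤ lo := by
    rw [hlo]
    exact le_trans (le_max_left _ _) (le_trans (le_max_left _ _) (le_trans (le_max_left _ _)
      (le_trans (le_max_left _ _) (le_max_left _ _))))
  have hhi9 : hi ≤ 9 := by
    rw [hhi]
    exact le_trans (min_le_left _ _) (le_trans (min_le_left _ _) (le_trans (min_le_left _ _)
      (le_trans (min_le_left _ _) (min_le_left _ _))))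
  by_cases hd : S4 - a < 0 ∨ S4 - a > 9
  · rw [if_pos hd]
    rw [PySem.List.foldl_congr_mem (g := fun num b =>
          if (1:Int) ≤ b ∧ b ≤ 0 then num + 1 else num)]
    · rw [count_pyRange10]; omega
    · intro num b _
      congr 1
      rw [eq_iff_iff, is_true_six]
      omega
  · rw [if_neg hd]
    rw [PySem.List.foldl_congr_mem (g := fun num b =>
          if lo ≤ b ∧ b ≤ hi then num + 1 else num)]
    · rw [count_pyRange10]
      omega
    · intro num b hb
      rw [PySem.List.mem_pyRange_one] at hb
      congr 1
      rw [eq_iff_iff, is_true_six, hlo, hhi]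
      simp only [max_le_iff, le_min_iff]
      omega

-- A's digit-extraction loop yields the five arithmetic digits B computes
lemma digits_eq (n : Int) :
    ((PySem.List.pyRange 0 5 1).foldl
      (fun (st : List Int × Int) _ => (PySem.Int.mod st.2 10 :: st.1, PySem.Int.floordiv st.2 10))
      ([], n)).1
    = [PySem.Int.mod (PySem.Int.floordiv n 10000) 10,
       PySem.Int.mod (PySem.Int.floordiv n 1000) 10,
       PySem.Int.mod (PySem.Int.floordiv n 100) 10,
       PySem.Int.mod (PySem.Int.floordiv n 10) 10,
       PySem.Int.mod n 10] := by
  rw [show PySem.List.pyRange 0 5 1 = [0,1,2,3,4] from by decide]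
  simp only [List.foldl,
    PySem.Int.floordiv_eq_ediv_of_pos (by norm_num : (0:Int) < 10),
    PySem.Int.floordiv_eq_ediv_of_pos (by norm_num : (0:Int) < 100),
    PySem.Int.floordiv_eq_ediv_of_pos (by norm_num : (0:Int) < 1000),
    PySem.Int.floordiv_eq_ediv_of_pos (by norm_num : (0:Int) < 10000),
    PySem.Int.mod_eq_emod_of_pos (by norm_num : (0:Int) < 10),
    List.cons.injEq, and_true]
  omega

-- ===== VERDICT (by name: the statement is the Claim_ definition above) =====
set_option maxHeartbeats 2000000 in
theorem Criss_Cross_spec : Claim_equal_Criss_Cross := by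
  intro S _
  unfold Spec_Criss_Cross Criss_Cross Criss_Cross_alt
  apply PySem.List.foldl_congr_mem
  intro num n hn
  rw [PySem.List.mem_pyRange_one] at hn
  have h0 : PySem.Int.mod (PySem.Int.floordiv n 10000) 10 = PySem.Int.floordiv n 10000 := by
    rw [PySem.Int.mod_eq_emod_of_pos (by norm_num : (0:Int) < 10),
        PySem.Int.floordiv_eq_ediv_of_pos (by norm_num : (0:Int) < 10000)]
    omega
  simp only [digits_eq n, h0]
  set d0 := PySem.Int.floordiv n 10000 with hd0
  set d1 := PySem.Int.mod (PySem.Int.floordiv n 1000) 10 with hd1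
  set d2 := PySem.Int.mod (PySem.Int.floordiv n 100) 10 with hd2
  set d3 := PySem.Int.mod (PySem.Int.floordiv n 10) 10 with hd3
  set d4 := PySem.Int.mod n 10 with hd4
  have hs1 : (PySem.List.slice [d0, d1, d2, d3, d4] none (some 3)).sum = d0 + d1 + d2 := by
    simp [PySem.List.slice]; ring
  have hs2 : (PySem.List.slice [d0, d1, d2, d3, d4] (some 2) none).sum = d2 + d3 + d4 := by
    simp [PySem.List.slice]; ring
  have hg0 : PySem.List.pyGetD [d0, d1, d2, d3, d4] 0 0 = d0 := rfl
  have hg1 : PySem.List.pyGetD [d0, d1, d2, d3, d4] 1 0 = d1 := rfl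
  have hg2 : PySem.List.pyGetD [d0, d1, d2, d3, d4] 2 0 = d2 := rfl
  have hg3 : PySem.List.pyGetD [d0, d1, d2, d3, d4] 3 0 = d3 := rfl
  have hg4 : PySem.List.pyGetD [d0, d1, d2, d3, d4] 4 0 = d4 := rfl
  rw [hs1, hs2, hg0, hg1, hg2, hg3, hg4]
  split_ifs <;> try rfl
  exact inner_eq S d0 d1 d3 d4 _ _ num
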